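-- pv_equiv track=rewrite | github.com/Arselena/higher-school | Level_0_25.py | TransformTransform
-- ===== SOURCE A (Python) =====
-- def TransformTransform(A:int, N:int):
--     def tratsform(A):
--         B = []
--         for i in range(len(A)):
--             for j in range(len(A)-i):
--                 k = i + j
--                 a = A[j:k]
--                 if a != []:
--                     a_max = max(a)
--                     B.append(a_max)
--         return B
--
--     b = tratsform(tratsform(A))
--
--     rez = False
--     if sum(b) % 2 == 0:
--         rez = True
--
--     return rez
-- ===== SOURCE B (Python) =====
-- def TransformTransform(A, N):
--     # DP over window lengths: row L holds the maxima of all length-L windows of P,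
--     # each entry derived from row L-1 in O(1); used for both transform stages.
--     def window_rows(P):
--         rows = []
--         row = list(P)
--         while row:
--             rows.append(row)
--             row = [max(row[j], P[j + len(rows)]) for j in range(len(row) - 1)]
--         return rows
--
--     b = [x for row in window_rows(A[:-1]) for x in row]
--     Q = b[:-1]
--     total = sum(x for row in window_rows(Q) for x in row)
--     return total % 2 == 0
-- ===== Notes on version B (the rewrite author's own statement) =====
-- stated objective: faster
-- what changed: B replaces A's per-slice max scans (max over every slice, for both transform stages) by a dynamic program that derives each length-(L+1) window-maxima row from the length-L row in O(1) per entry, reused for both stages.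
import Mathlib
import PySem

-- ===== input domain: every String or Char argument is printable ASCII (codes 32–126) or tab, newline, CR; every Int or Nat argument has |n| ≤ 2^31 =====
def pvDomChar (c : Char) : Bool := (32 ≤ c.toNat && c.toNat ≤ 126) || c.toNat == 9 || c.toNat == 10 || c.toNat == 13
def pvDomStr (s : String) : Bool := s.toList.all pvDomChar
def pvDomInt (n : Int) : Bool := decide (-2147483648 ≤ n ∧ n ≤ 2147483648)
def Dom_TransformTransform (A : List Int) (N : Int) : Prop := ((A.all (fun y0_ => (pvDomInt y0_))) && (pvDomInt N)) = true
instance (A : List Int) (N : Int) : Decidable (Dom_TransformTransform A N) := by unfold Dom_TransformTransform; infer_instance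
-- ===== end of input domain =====

-- B replaces A's repeated max-over-slice scans by a DP deriving each window-maxima row
-- from the previous row; objective: faster.

-- ===== PORT A =====
-- inner helper 'tratsform(A)': appends max(A[j:i+j]) for every nonempty slice
def pvTrat (A : List Int) : List Int :=
  (PySem.List.pyRange 0 (A.length : Int) 1).foldl (fun B i =>
    (PySem.List.pyRange 0 ((A.length : Int) - i) 1).foldl (fun B j =>
      let k := i + j
      let a := PySem.List.slice A (some j) (some k)
      if a ≠ [] then B ++ [(PySem.List.max? a (fun y => y)).getD 0] else B) B) []

def TransformTransform (A : List Int) (N : Int) : Bool :=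
  let b := pvTrat (pvTrat A)
  let rez := false
  if PySem.Int.mod b.sum 2 = 0 then true else rez

-- ===== PORT B =====
-- row = [max(row[j], P[j+len(rows)]) for j in range(len(row)-1)]
def pvNextRow (P row : List Int) (L : Nat) : List Int :=
  (List.range (row.length - 1)).map (fun (j : Nat) =>
    max (PySem.List.pyGetD row ((j : Int)) 0) (PySem.List.pyGetD P ((j : Int) + (L : Int)) 0))

-- the 'while row:' loop of window_rows; L = len(rows) after appending the current row
def pvRows (P : List Int) (row : List Int) (L : Nat) : List (List Int) :=
  match row with
  | [] => []
  | x :: xs => (x :: xs) :: pvRows P (pvNextRow P (x :: xs) L) (L + 1)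
termination_by row.length
decreasing_by simp [pvNextRow]

def TransformTransform_alt (A : List Int) (N : Int) : Bool :=
  -- A[:-1] and b[:-1] are dropLast (exact: PySem.List.slice_to_neg_one)
  let b := (pvRows A.dropLast A.dropLast 1).flatten
  let Q := b.dropLast
  let total := ((pvRows Q Q 1).flatten).sum
  PySem.Int.mod total 2 = 0

-- ===== PRECONDITION & SPEC =====
def Spec_TransformTransform (A : List Int) (N : Int) (out : Bool) : Prop := out = TransformTransform_alt A N
instance (A : List Int) (N : Int) (out : Bool) : Decidable (Spec_TransformTransform A N out) := by unfold Spec_TransformTransform; infer_instance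

-- ===== CLAIM (what is proved, stated in full; the proofs are below) =====
def Claim_equal_TransformTransform : Prop := ∀ (A : List Int) (N : Int), Dom_TransformTransform A N → Spec_TransformTransform A N (TransformTransform A N)

-- ===== LEMMAS AND PROOFS =====

-- max of the length-L window of P starting at j (only used with 1 ≤ L, j + L ≤ P.length)
def wmax (P : List Int) (j L : Nat) : Int :=
  (List.range L).foldl (fun acc t => max acc (P.getD (j + t) 0)) (P.getD j 0)

-- the row of maxima of all length-L windows of P
def specRow (P : List Int) (L : Nat) : List Int :=
  (List.range (P.length + 1 - L)).map (fun j => wmax P j L)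

theorem wmax_succ (P : List Int) (j L : Nat) :
    wmax P j (L + 1) = max (wmax P j L) (P.getD (j + L) 0) := by
  simp [wmax, List.range_succ]

theorem specRow_one (P : List Int) : specRow P 1 = P := by
  apply List.ext_getElem
  · simp [specRow]
  · intro i h1 h2
    simp [specRow, wmax, List.getElem?_eq_getElem h2]

theorem getD_specRow (P : List Int) (L j : Nat) (h : j < P.length + 1 - L) :
    (specRow P L).getD j 0 = wmax P j L := by
  rw [specRow, List.getD_eq_getElem _ _ (by simpa using h)]
  simp

theorem nextRow_spec (P : List Int) (L : Nat) :
    pvNextRow P (specRow P L) L = specRow P (L + 1) := by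
  unfold pvNextRow
  have hlen : (specRow P L).length - 1 = P.length + 1 - (L + 1) := by simp [specRow]; omega
  rw [hlen]
  conv_rhs => rw [specRow]
  apply List.map_congr_left
  intro j hj
  rw [List.mem_range] at hj
  have h1 : ((j : Int) + (L : Int)) = ((j + L : Nat) : Int) := by push_cast; ring
  rw [h1]
  simp only [PySem.List.pyGetD_natCast]
  rw [getD_specRow P L j (by omega), wmax_succ]

theorem pvRows_nil (P : List Int) (L : Nat) : pvRows P [] L = [] := by
  simp [pvRows]

theorem pvRows_cons (P : List Int) (x : Int) (xs : List Int) (L : Nat) :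
    pvRows P (x :: xs) L = (x :: xs) :: pvRows P (pvNextRow P (x :: xs) L) (L + 1) := by
  rw [pvRows]

theorem rows_spec (k : Nat) : ∀ (L : Nat) (P : List Int), 1 ≤ L →
    k = P.length + 1 - L →
    pvRows P (specRow P L) L = (List.range k).map (fun t => specRow P (L + t)) := by
  induction k with
  | zero =>
    intro L P hL hk
    have : specRow P L = [] := by
      apply List.eq_nil_of_length_eq_zero; simp [specRow]; omega
    rw [this, pvRows_nil]; simp
  | succ k ih =>
    intro L P hL hk
    have hlen : (specRow P L).length = k + 1 := by simp [specRow]; omega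
    obtain ⟨x, xs, hx⟩ : ∃ x xs, specRow P L = x :: xs := by
      cases h : specRow P L with
      | nil => rw [h] at hlen; simp at hlen
      | cons a as => exact ⟨a, as, rfl⟩
    rw [hx, pvRows_cons, ← hx, nextRow_spec, ih (L + 1) P (by omega) (by simp [specRow] at hlen; omega)]
    rw [List.range_succ_eq_map, List.map_cons, List.map_map]
    congr 1
    apply List.map_congr_left
    intro t _
    simp only [Function.comp_apply]
    congr 1
    omega

theorem foldl_max_take (Y : List Int) : ∀ (k s : Nat) (a : Int), s + k ≤ Y.length →
    ((Y.drop s).take k).foldl max a =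
      (List.range k).foldl (fun acc t => max acc (Y.getD (s + t) 0)) a := by
  intro k
  induction k with
  | zero => simp
  | succ k ih =>
    intro s a h
    have hs : s < Y.length := by omega
    rw [List.drop_eq_getElem_cons hs, List.take_succ_cons, List.foldl_cons,
      List.range_succ_eq_map, List.foldl_cons, List.foldl_map]
    rw [ih (s+1) (max a Y[s]) (by omega)]
    have : (fun (acc : Int) (t : Nat) => max acc (Y.getD (s + Nat.succ t) 0))
         = (fun (acc : Int) (t : Nat) => max acc (Y.getD (s + 1 + t) 0)) := by
      funext acc t; rw [show s + Nat.succ t = s + 1 + t by omega]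
    rw [this]
    norm_num [List.getElem?_eq_getElem hs]

theorem slice_window (X : List Int) (j L : Nat) (h : j + L ≤ X.length - 1) :
    PySem.List.slice X (some (j : Int)) (some ((L : Int) + (j : Int))) =
      (X.dropLast.drop j).take L := by
  have h1 : ((L : Int) + (j : Int)) = (((L + j : Nat)) : Int) := by push_cast; ring
  rw [h1, PySem.List.slice_natCast]
  rw [List.dropLast_eq_take, List.drop_take, List.take_take]
  congr 1
  omega

theorem max_window (X : List Int) (j L : Nat) (hL : 1 ≤ L) (h : j + L ≤ X.length - 1) :
    (PySem.List.max? (PySem.List.slice X (some (j : Int)) (some ((L : Int) + (j : Int)))) (fun y => y)).getD 0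
      = wmax X.dropLast j L := by
  rw [slice_window X j L h]
  set P := X.dropLast with hP
  have hPlen : P.length = X.length - 1 := by simp [hP]
  have hj : j < P.length := by omega
  obtain ⟨L', rfl⟩ : ∃ L', L = L' + 1 := ⟨L - 1, by omega⟩
  rw [List.drop_eq_getElem_cons hj, List.take_succ_cons, PySem.List.max?_id_cons]
  rw [Option.getD_some]
  rw [foldl_max_take P L' (j+1) P[j] (by omega)]
  rw [wmax]
  rw [List.range_succ_eq_map, List.foldl_cons, List.foldl_map]
  have e1 : max (P.getD j 0) (P.getD (j + 0) 0) = P[j] := by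
    norm_num [List.getElem?_eq_getElem hj]
  rw [e1]
  have : (fun (acc : Int) (t : Nat) => max acc (P.getD (j + Nat.succ t) 0))
       = (fun (acc : Int) (t : Nat) => max acc (P.getD (j + 1 + t) 0)) := by
    funext acc t; rw [show j + Nat.succ t = j + 1 + t by omega]
  rw [this]

theorem foldl_const {α β : Type} (l : List β) (B : α) : l.foldl (fun b _ => b) B = B := by
  induction l generalizing B with
  | nil => rfl
  | cons x xs ih => simpa using ih B

theorem slice_self_nil (X : List Int) (j : Int) :
    PySem.List.slice X (some j) (some j) = [] := by
  apply List.eq_nil_of_length_eq_zero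
  rw [PySem.List.length_slice]; omega

-- the i = 0 iteration of A's outer loop appends nothing (all slices A[j:j] are empty)
theorem inner0 (X : List Int) (B : List Int) :
    (PySem.List.pyRange 0 ((X.length : Int) - 0) 1).foldl (fun B j =>
      let k := (0 : Int) + j
      let a := PySem.List.slice X (some j) (some k)
      if a ≠ [] then B ++ [(PySem.List.max? a (fun y => y)).getD 0] else B) B = B := by
  rw [PySem.List.foldl_congr_mem _ _ (fun b _ => b) B ?_, foldl_const]
  intro acc j _
  simp [slice_self_nil]

-- the i-th iteration (1 ≤ i ≤ len-1) of A's outer loop appends the length-i window maxima row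
theorem innerA (X : List Int) (i : Nat) (h1 : 1 ≤ i) (h2 : i ≤ X.length - 1) (B : List Int) :
    (PySem.List.pyRange 0 ((X.length : Int) - (i : Int)) 1).foldl (fun B j =>
      let k := (i : Int) + j
      let a := PySem.List.slice X (some j) (some k)
      if a ≠ [] then B ++ [(PySem.List.max? a (fun y => y)).getD 0] else B) B
    = B ++ specRow X.dropLast i := by
  rw [PySem.List.foldl_congr_mem _ _
      (fun B j => B ++ [(PySem.List.max? (PySem.List.slice X (some j) (some ((i : Int) + j))) (fun y => y)).getD 0]) B ?_]
  · rw [PySem.List.foldl_append_singleton_eq_map]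
    congr 1
    rw [PySem.List.pyRange_one, List.map_map, specRow]
    have hlen : X.dropLast.length + 1 - i = ((X.length : Int) - (i : Int) - 0).toNat := by
      simp [List.length_dropLast]; omega
    rw [hlen]
    apply List.map_congr_left
    intro k hk
    rw [List.mem_range] at hk
    simp only [Function.comp_apply, zero_add]
    rw [max_window X k i h1 (by simp [List.length_dropLast] at hlen; omega)]
  · intro acc j hj
    rw [PySem.List.mem_pyRange_one] at hj
    obtain ⟨jn, rfl⟩ : ∃ jn : Nat, j = (jn : Int) := ⟨j.toNat, by omega⟩
    have hb : jn + i ≤ X.length - 1 := by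
      have := hj.2
      omega
    have hne : PySem.List.slice X (some (jn : Int)) (some ((i : Int) + (jn : Int))) ≠ [] := by
      rw [slice_window X jn i hb]
      intro hnil
      have hl := congrArg List.length hnil
      simp [List.length_dropLast] at hl
      omega
    simp only []
    rw [if_pos hne]

theorem trat_eq (X : List Int) :
    pvTrat X = (pvRows X.dropLast X.dropLast 1).flatten := by
  by_cases hn : X.length = 0
  · have hX : X = [] := List.eq_nil_of_length_eq_zero hn
    subst hX
    simp [pvTrat, PySem.List.pyRange_one_eq_nil (by norm_num : (0:Int) ≤ 0), pvRows_nil]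
  · have hn1 : 1 ≤ X.length := by omega
    have hR : pvRows X.dropLast X.dropLast 1
        = (List.range (X.length - 1)).map (fun t => specRow X.dropLast (1 + t)) := by
      have h := rows_spec (X.length - 1) 1 X.dropLast (le_refl 1) (by simp [List.length_dropLast])
      rw [specRow_one] at h
      exact h
    rw [hR]
    unfold pvTrat
    rw [PySem.List.pyRange_one_append 0 1 (X.length : Int) (by norm_num) (by exact_mod_cast hn1)]
    rw [List.foldl_append]
    rw [show PySem.List.pyRange 0 1 1 = [0] from by simpa using PySem.List.pyRange_one_singleton (0:Int)]
    rw [List.foldl_cons, List.foldl_nil]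
    rw [inner0 X []]
    rw [PySem.List.foldl_congr_mem _ _ (fun B (i : Int) => B ++ specRow X.dropLast i.toNat) [] ?_]
    · rw [PySem.List.foldl_append_eq_flatMap, List.nil_append]
      rw [PySem.List.pyRange_one 1 (X.length : Int), List.flatMap_def, List.map_map]
      rw [show ((X.length : Int) - 1).toNat = X.length - 1 from by omega]
      refine congrArg List.flatten (List.map_congr_left ?_)
      intro t _
      simp only [Function.comp_apply]
      rw [show ((1 : Int) + (t : Int)).toNat = 1 + t from by omega]
    · intro acc i hi
      rw [PySem.List.mem_pyRange_one] at hi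
      obtain ⟨iN, rfl⟩ : ∃ iN : Nat, i = (iN : Int) := ⟨i.toNat, by omega⟩
      have h1 : 1 ≤ iN := by omega
      have h2 : iN ≤ X.length - 1 := by
        have := hi.2; omega
      simpa using innerA X iN h1 h2 acc

-- ===== VERDICT (by name: the statement is the Claim_ definition above) =====
theorem TransformTransform_spec : Claim_equal_TransformTransform := by
  intro A N _
  unfold Spec_TransformTransform TransformTransform TransformTransform_alt
  rw [trat_eq A, trat_eq ((pvRows A.dropLast A.dropLast 1).flatten)]
  by_cases h : PySem.Int.mod ((pvRows (pvRows A.dropLast A.dropLast 1).flatten.dropLast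
      (pvRows A.dropLast A.dropLast 1).flatten.dropLast 1).flatten).sum 2 = 0 <;> simp [h]
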